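-- pv_equiv track=rewrite | github.com/mdalzell/advent-of-code-2019 | src/helpers/day6.py | buildOrbitDictionary
-- ===== SOURCE A (Python) =====
-- def buildOrbitDictionary(orbitMap):
--     dictionary = {}
--     for orbit in orbitMap:
--         [centerOfMass, satellite] = orbit.split(')')
--
--         if centerOfMass in dictionary:
--             dictionary[centerOfMass].append(satellite)
--         else:
--             dictionary[centerOfMass] = [satellite]
--
--     return dictionary
-- ===== SOURCE B (Python) =====
-- def buildOrbitDictionary(orbitMap):
--     pairs = [orbit.split(')') for orbit in orbitMap]
--     centers = []
--     for c, _ in pairs: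
--         if c not in centers:
--             centers.append(c)
--     return {c: [s for c2, s in pairs if c2 == c] for c in centers}
-- ===== Notes on version B (the rewrite author's own statement) =====
-- stated objective: alternative
-- what changed: Replaces A's single streaming dict accumulation (membership test + append-or-create per line) with a two-phase plan: pre-split all lines, collect the first-occurrence-ordered center list, then build the dict by one comprehension that filters each center's satellites.
import Mathlib
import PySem

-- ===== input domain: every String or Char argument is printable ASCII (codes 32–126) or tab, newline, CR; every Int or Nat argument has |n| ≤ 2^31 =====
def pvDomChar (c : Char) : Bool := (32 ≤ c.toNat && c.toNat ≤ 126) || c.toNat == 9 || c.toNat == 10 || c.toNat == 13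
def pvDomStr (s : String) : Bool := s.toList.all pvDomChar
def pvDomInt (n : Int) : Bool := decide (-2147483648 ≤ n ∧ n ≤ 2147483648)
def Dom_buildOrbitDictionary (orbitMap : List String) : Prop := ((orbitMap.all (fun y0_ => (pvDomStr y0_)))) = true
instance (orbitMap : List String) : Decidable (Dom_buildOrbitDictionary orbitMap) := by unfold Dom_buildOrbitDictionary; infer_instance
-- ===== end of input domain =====

-- B replaces A's streaming dict accumulation with a two-phase plan (pre-split lines,
-- first-occurrence center list, per-center filter comprehension): alternative decomposition, same results.


-- ===== PORT A =====
def buildOrbitDictionary (orbitMap : List String) : List (String × List String) :=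
  (orbitMap.foldl (fun dictionary orbit =>
      match PySem.Str.split? orbit ")" with
      | some [centerOfMass, satellite] =>
        if dictionary.contains centerOfMass then
          -- dictionary[centerOfMass].append(satellite)
          dictionary.modify centerOfMass [] (fun sats => sats ++ [satellite])
        else
          dictionary.insert centerOfMass [satellite]
      | _ => dictionary  -- unreachable under Pre_: the unpacking '[c, s] = …' raises ValueError
    ) PySem.Dict.empty).items

-- ===== PORT B =====
def buildOrbitDictionary_alt (orbitMap : List String) : List (String × List String) :=
  let pairs := orbitMap.map (fun orbit => PySem.Str.split? orbit ")")
  let centers := pairs.foldl (fun centers p =>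
      -- 'c, _ = p' unpack, written as single-depth matches (raises outside Pre_)
      match p with
      | some ps =>
        match ps with
        | c :: rest =>
          match rest with
          | _ :: rest2 =>
            match rest2 with
            | [] => if c ∈ centers then centers else centers ++ [c]
            | _ :: _ => centers
          | [] => centers
        | [] => centers
      | none => centers
    ) []
  centers.map (fun c =>
    (c, pairs.filterMap (fun p =>
        -- 'c2, s = p' unpack, written as single-depth matches (raises outside Pre_)
        match p with
        | some ps =>
          match ps with
          | c2 :: rest =>
            match rest with
            | s :: rest2 =>
              match rest2 with
              | [] => if c2 == c then some s else none
              | _ :: _ => none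
            | [] => none
          | [] => none
        | none => none)))

-- ===== PRECONDITION & SPEC =====
-- Pre_ excludes exactly the lines without exactly one ')': there the unpacking
-- '[centerOfMass, satellite] = orbit.split(')')' raises ValueError in A (and B raises too).
def Pre_buildOrbitDictionary (orbitMap : List String) : Prop :=
  ∀ o ∈ orbitMap, ((PySem.Str.split? o ")").getD []).length = 2
instance (orbitMap : List String) : Decidable (Pre_buildOrbitDictionary orbitMap) := by
  unfold Pre_buildOrbitDictionary; infer_instance
def pvWitness_buildOrbitDictionary : List String := ["COM)B", "COM)C", "B)D", "C)E"]

def Spec_buildOrbitDictionary (orbitMap : List String) (out : List (String × List String)) : Prop := out = buildOrbitDictionary_alt orbitMap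
instance (orbitMap : List String) (out : List (String × List String)) : Decidable (Spec_buildOrbitDictionary orbitMap out) := by unfold Spec_buildOrbitDictionary; infer_instance

-- ===== CLAIM (what is proved, stated in full; the proofs are below) =====
def Claim_equal_buildOrbitDictionary : Prop := ∀ (orbitMap : List String), Dom_buildOrbitDictionary orbitMap → Pre_buildOrbitDictionary orbitMap → Spec_buildOrbitDictionary orbitMap (buildOrbitDictionary orbitMap)

-- ===== LEMMAS AND PROOFS =====

-- The center and satellite of a well-formed line.
def obKey (o : String) : String := ((PySem.Str.split? o ")").getD []).getD 0 ""
def obSat (o : String) : String := ((PySem.Str.split? o ")").getD []).getD 1 ""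

lemma split_shape (o : String) (h : ((PySem.Str.split? o ")").getD []).length = 2) :
    PySem.Str.split? o ")" = some [obKey o, obSat o] := by
  unfold obKey obSat
  cases hs : PySem.Str.split? o ")" with
  | none => simp [hs] at h
  | some l =>
    rw [hs] at h
    match l, h with
    | [a, b], _ => simp [hs]


-- the pair list both programs conceptually work over
def obPairs (l : List String) : List (String × String) := l.map (fun o => (obKey o, obSat o))

-- canonical grouped form both ports reduce to
def obGroup (l : List String) : List (String × List String) :=
  (PySem.Set.ofList ((obPairs l).map (·.1))).map
    (fun c => (c, ((obPairs l).filter (fun p => p.1 == c)).map (·.2)))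

lemma portA_eq_group (l : List String) (h : Pre_buildOrbitDictionary l) :
    buildOrbitDictionary l = obGroup l := by
  unfold buildOrbitDictionary obGroup
  have hstep : ∀ (d : PySem.Dict String (List String)), ∀ o ∈ l,
      (match PySem.Str.split? o ")" with
      | some [centerOfMass, satellite] =>
        if d.contains centerOfMass then
          d.modify centerOfMass [] (fun sats => sats ++ [satellite])
        else
          d.insert centerOfMass [satellite]
      | _ => d)
      = d.modify (obKey o) [] (fun sats => sats ++ [obSat o]) := by
    intro d o ho
    rw [split_shape o (h o ho)]
    by_cases hc : d.contains (obKey o)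
    · simp [hc]
    · have hget : d.get? (obKey o) = none := by
        rw [PySem.Dict.get?_eq_none_iff_contains]
        simpa using hc
      simp [hc, PySem.Dict.modify, PySem.Dict.getD, hget]
  rw [PySem.List.foldl_congr_mem l _ _ _ hstep]
  have hmap : List.foldl (fun (d : PySem.Dict String (List String)) o =>
        d.modify (obKey o) [] (fun sats => sats ++ [obSat o])) PySem.Dict.empty l
      = List.foldl (fun (d : PySem.Dict String (List String)) p =>
        d.modify p.1 [] (fun sats => sats ++ [p.2])) PySem.Dict.empty (obPairs l) := by
    rw [obPairs, List.foldl_map]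
  rw [hmap]
  set D := List.foldl (fun (d : PySem.Dict String (List String)) p =>
    d.modify p.1 [] (fun sats => sats ++ [p.2])) PySem.Dict.empty (obPairs l) with hD
  have hkeys : D.keys = PySem.Set.ofList ((obPairs l).map (·.1)) := by
    rw [hD]
    rw [PySem.Dict.keys_foldl_modify_key (obPairs l) (·.1) [] (fun _ p => (fun sats => sats ++ [p.2]))]
    rw [PySem.Dict.keys_empty, PySem.Set.update_nil_left]
  have hnd : D.keys.Nodup := by
    rw [hkeys]; exact PySem.Set.nodup_ofList _
  rw [PySem.Dict.items_eq_map_keys D hnd []]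
  rw [hkeys]
  apply List.map_congr_left
  intro c _
  rw [hD, PySem.Dict.getD_foldl_modify_append, PySem.Dict.getD_empty]
  simp

lemma portB_centers (l : List String) (h : Pre_buildOrbitDictionary l) :
    (l.map (fun o => PySem.Str.split? o ")")).foldl (fun centers p =>
      match p with
      | some ps =>
        match ps with
        | c :: rest =>
          match rest with
          | _ :: rest2 =>
            match rest2 with
            | [] => if c ∈ centers then centers else centers ++ [c]
            | _ :: _ => centers
          | [] => centers
        | [] => centers
      | none => centers) []
    = PySem.Set.ofList ((obPairs l).map (·.1)) := by
  rw [List.foldl_map, obPairs, List.map_map, PySem.Set.ofList_eq_foldl, List.foldl_map]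
  apply PySem.List.foldl_congr_mem
  intro acc o ho
  rw [split_shape o (h o ho), PySem.Set.add_eq_ite]
  simp

lemma portB_filter (l : List String) (h : Pre_buildOrbitDictionary l) (c : String) :
    (l.map (fun o => PySem.Str.split? o ")")).filterMap (fun p =>
      match p with
      | some ps =>
        match ps with
        | c2 :: rest =>
          match rest with
          | s :: rest2 =>
            match rest2 with
            | [] => if c2 == c then some s else none
            | _ :: _ => none
          | [] => none
        | [] => none
      | none => none)
    = ((obPairs l).filter (fun p => p.1 == c)).map (·.2) := by
  induction l with
  | nil => simp [obPairs]
  | cons o t ih =>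
    have ho := split_shape o (h o (List.mem_cons_self))
    have ht := ih (fun x hx => h x (List.mem_cons_of_mem o hx))
    rw [List.map_cons, List.filterMap_cons, ho]
    by_cases hc : obKey o == c
    · simp only [obPairs] at ht
      simp only [obPairs, List.map_cons, List.filter_cons, hc, if_true]
      simp at ht ⊢
      exact ht
    · simp only [obPairs] at ht
      simp only [obPairs, List.map_cons, List.filter_cons, hc]
      simp at ht ⊢
      exact ht

lemma portB_eq_group (l : List String) (h : Pre_buildOrbitDictionary l) :
    buildOrbitDictionary_alt l = obGroup l := by
  unfold buildOrbitDictionary_alt obGroup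
  simp only
  rw [portB_centers l h]
  apply List.map_congr_left
  intro c _
  rw [portB_filter l h c]

-- ===== VERDICT (by name: the statement is the Claim_ definition above) =====
theorem buildOrbitDictionary_spec : Claim_equal_buildOrbitDictionary := by
  intro l _ hpre
  unfold Spec_buildOrbitDictionary
  rw [portA_eq_group l hpre, portB_eq_group l hpre]
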